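-- pv_equiv track=rewrite | github.com/Haoyi-Zhang/WatermarkScope | projects/CodeDye/scripts/aggregate_results.py | _record_schema_missing_fields
-- ===== SOURCE A (Python) =====
-- REQUIRED_CANONICAL_RECORD_FIELDS = (
--     "admissible_output_visible_canary_evidence_count",
--     "diagnostic_evidence_count",
--     "hidden_test_family_diagnostic_only",
-- )
--
-- def _record_schema_missing_fields(records: list[dict[str, object]]) -> list[str]:
--     if not records:
--         return ["missing_or_empty_canonical_records"]
--     missing: set[str] = set()
--     for item in records:
--         for field in REQUIRED_CANONICAL_RECORD_FIELDS:
--             if field not in item: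
--                 missing.add(field)
--         for issue in _trace_schema_issues(item):
--             missing.add(issue)
--     return sorted(missing)
--
-- def _trace_schema_issues(item: dict[str, object]) -> list[str]:
--     trace = [str(entry) for entry in item.get("evidence_trace", [])]
--     issues: list[str] = []
--     if any("direct_canary_rule:requires_direct_output_visible_or_hidden_canary" in entry for entry in trace):
--         issues.append("stale_direct_canary_rule_trace")
--     if not any(entry.startswith("headline_evidence_rule:") for entry in trace):
--         issues.append("missing_headline_evidence_rule_trace")
--     if not any(entry.startswith("hidden_test_family_rule:") for entry in trace):
--         issues.append("missing_hidden_test_family_rule_trace")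
--     return issues
-- ===== SOURCE B (Python) =====
-- REQUIRED_CANONICAL_RECORD_FIELDS = (
--     "admissible_output_visible_canary_evidence_count",
--     "diagnostic_evidence_count",
--     "hidden_test_family_diagnostic_only",
-- )
--
-- _STALE = "direct_canary_rule:requires_direct_output_visible_or_hidden_canary"
--
--
-- def _record_schema_missing_fields(records: list[dict[str, object]]) -> list[str]:
--     if not records:
--         return ["missing_or_empty_canonical_records"]
--     traces = [[str(e) for e in item.get("evidence_trace", [])] for item in records]
--     # One independent scan per marker; the pairs are listed in sorted order already.
--     markers = [
--         ("admissible_output_visible_canary_evidence_count",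
--          any("admissible_output_visible_canary_evidence_count" not in item for item in records)),
--         ("diagnostic_evidence_count",
--          any("diagnostic_evidence_count" not in item for item in records)),
--         ("hidden_test_family_diagnostic_only",
--          any("hidden_test_family_diagnostic_only" not in item for item in records)),
--         ("missing_headline_evidence_rule_trace",
--          any(not any(e.startswith("headline_evidence_rule:") for e in t) for t in traces)),
--         ("missing_hidden_test_family_rule_trace",
--          any(not any(e.startswith("hidden_test_family_rule:") for e in t) for t in traces)),
--         ("stale_direct_canary_rule_trace",
--          any(_STALE in e for t in traces for e in t)),
--     ]
--     return [name for name, hit in markers if hit]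
-- ===== Notes on version B (the rewrite author's own statement) =====
-- stated objective: alternative
-- what changed: A does one record-major pass accumulating unordered markers into a set and sorts them at the end; B transposes this into six independent marker-major scans (one per possible marker) and filters a fixed list of the markers already written in sorted order, so no set and no sort are needed.
import Mathlib
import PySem

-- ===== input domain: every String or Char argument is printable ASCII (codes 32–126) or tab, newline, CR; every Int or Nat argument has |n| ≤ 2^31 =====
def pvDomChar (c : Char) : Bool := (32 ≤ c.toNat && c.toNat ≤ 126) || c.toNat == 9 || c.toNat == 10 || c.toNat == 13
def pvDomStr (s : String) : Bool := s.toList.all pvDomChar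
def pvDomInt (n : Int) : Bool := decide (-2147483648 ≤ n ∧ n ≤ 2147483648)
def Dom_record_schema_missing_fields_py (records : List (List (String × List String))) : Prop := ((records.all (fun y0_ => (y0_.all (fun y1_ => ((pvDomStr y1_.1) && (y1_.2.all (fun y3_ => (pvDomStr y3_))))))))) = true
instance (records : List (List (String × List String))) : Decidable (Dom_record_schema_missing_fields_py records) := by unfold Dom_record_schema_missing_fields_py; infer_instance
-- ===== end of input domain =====

-- B replaces A's record-major set-accumulate-then-sort with six independent marker scans filtered in already-sorted order (objective: alternative decomposition, same cost).

-- ===== PORT A =====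
def pvFields : List String :=
  ["admissible_output_visible_canary_evidence_count",
   "diagnostic_evidence_count",
   "hidden_test_family_diagnostic_only"]

def pvStale : String := "direct_canary_rule:requires_direct_output_visible_or_hidden_canary"

-- item.get("evidence_trace", []); str(entry) on a str is the identity, so the coercion map is dropped
def pvTrace (item : List (String × List String)) : List String :=
  PySem.Dict.getD (PySem.Dict.mk item) "evidence_trace" []

def trace_schema_issues (item : List (String × List String)) : List String :=
  (if (pvTrace item).any (fun e => PySem.Str.isIn pvStale e) then ["stale_direct_canary_rule_trace"] else []) ++
  (if !((pvTrace item).any (fun e => PySem.Str.startswith e "headline_evidence_rule:")) then ["missing_headline_evidence_rule_trace"] else []) ++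
  (if !((pvTrace item).any (fun e => PySem.Str.startswith e "hidden_test_family_rule:")) then ["missing_hidden_test_family_rule_trace"] else [])

-- the body of A's 'for item in records' loop: the three required-field checks, then the trace issues
def pvStep (m : PySem.Set String) (item : List (String × List String)) : PySem.Set String :=
  (trace_schema_issues item).foldl (fun m issue => PySem.Set.add m issue)
    (pvFields.foldl (fun m f =>
      if !(PySem.Dict.contains (PySem.Dict.mk item) f) then PySem.Set.add m f else m) m)

def record_schema_missing_fields_py (records : List (List (String × List String))) : List String :=
  if records = [] then ["missing_or_empty_canonical_records"]
  else
    let missing : PySem.Set String := records.foldl pvStep PySem.Set.empty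
    PySem.List.sorted missing (fun x => x) false

-- ===== PORT B =====
def record_schema_missing_fields_py_alt (records : List (List (String × List String))) : List String :=
  if records = [] then ["missing_or_empty_canonical_records"]
  else
    let traces := records.map pvTrace
    let markers : List (String × Bool) :=
      [("admissible_output_visible_canary_evidence_count",
        records.any (fun item => !(PySem.Dict.contains (PySem.Dict.mk item) "admissible_output_visible_canary_evidence_count"))),
       ("diagnostic_evidence_count",
        records.any (fun item => !(PySem.Dict.contains (PySem.Dict.mk item) "diagnostic_evidence_count"))),
       ("hidden_test_family_diagnostic_only",
        records.any (fun item => !(PySem.Dict.contains (PySem.Dict.mk item) "hidden_test_family_diagnostic_only"))),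
       ("missing_headline_evidence_rule_trace",
        traces.any (fun t => !(t.any (fun e => PySem.Str.startswith e "headline_evidence_rule:")))),
       ("missing_hidden_test_family_rule_trace",
        traces.any (fun t => !(t.any (fun e => PySem.Str.startswith e "hidden_test_family_rule:")))),
       ("stale_direct_canary_rule_trace",
        traces.any (fun t => t.any (fun e => PySem.Str.isIn pvStale e)))]
    (markers.filter (fun p => p.2)).map (fun p => p.1)

-- ===== PRECONDITION & SPEC =====
def Spec_record_schema_missing_fields_py (records : List (List (String × List String))) (out : List String) : Prop := out = record_schema_missing_fields_py_alt records
instance (records : List (List (String × List String))) (out : List String) : Decidable (Spec_record_schema_missing_fields_py records out) := by unfold Spec_record_schema_missing_fields_py; infer_instance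

-- ===== CLAIM (what is proved, stated in full; the proofs are below) =====
def Claim_equal_record_schema_missing_fields_py : Prop := ∀ (records : List (List (String × List String))), Dom_record_schema_missing_fields_py records → Spec_record_schema_missing_fields_py records (record_schema_missing_fields_py records)

-- ===== LEMMAS AND PROOFS =====

theorem mem_foldl_ite_add (l : List String) (c : String → Bool) (s : PySem.Set String) (x : String) :
    x ∈ l.foldl (fun m f => if c f then PySem.Set.add m f else m) s ↔ x ∈ s ∨ ∃ f ∈ l, c f ∧ x = f := by
  induction l generalizing s with
  | nil => simp
  | cons a l ih =>
    simp only [List.foldl_cons, List.exists_mem_cons_iff]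
    by_cases h : c a = true
    · simp only [h, if_true, ih, PySem.Set.mem_add]; tauto
    · simp only [h, if_false, ih, Bool.false_eq_true]; tauto

theorem nodup_foldl_ite_add (l : List String) (c : String → Bool) (s : PySem.Set String)
    (hs : s.Nodup) : (l.foldl (fun m f => if c f then PySem.Set.add m f else m) s).Nodup := by
  induction l generalizing s with
  | nil => exact hs
  | cons a l ih =>
    by_cases h : c a = true <;> simp [List.foldl_cons, h]
    · exact ih _ (PySem.Set.nodup_add _ _ hs)
    · exact ih _ hs

theorem mem_foldl_add (l : List String) (s : PySem.Set String) (x : String) :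
    x ∈ l.foldl (fun m issue => PySem.Set.add m issue) s ↔ x ∈ s ∨ x ∈ l := by
  induction l generalizing s with
  | nil => simp
  | cons a l ih => simp [List.foldl_cons, ih, PySem.Set.mem_add]; tauto

theorem nodup_foldl_add (l : List String) (s : PySem.Set String)
    (hs : s.Nodup) : (l.foldl (fun m issue => PySem.Set.add m issue) s).Nodup := by
  induction l generalizing s with
  | nil => exact hs
  | cons a l ih => exact ih _ (PySem.Set.nodup_add _ _ hs)

theorem mem_foldl_step (records : List (List (String × List String))) (s : PySem.Set String) (x : String) :
    x ∈ records.foldl pvStep s ↔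
      x ∈ s ∨ ∃ item ∈ records,
        (∃ f ∈ pvFields, !(PySem.Dict.contains (PySem.Dict.mk item) f) ∧ x = f) ∨
        x ∈ trace_schema_issues item := by
  induction records generalizing s with
  | nil => simp
  | cons a l ih =>
    simp only [List.foldl_cons, ih, pvStep, mem_foldl_add, mem_foldl_ite_add,
      List.exists_mem_cons_iff, or_assoc]

theorem nodup_foldl_step (records : List (List (String × List String))) (s : PySem.Set String)
    (hs : s.Nodup) : (records.foldl pvStep s).Nodup := by
  induction records generalizing s with
  | nil => exact hs
  | cons a l ih =>
    exact ih _ (nodup_foldl_add _ _ (nodup_foldl_ite_add _ _ _ hs))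

theorem mem_trace_issues (item : List (String × List String)) (x : String) :
    x ∈ trace_schema_issues item ↔
      (x = "stale_direct_canary_rule_trace" ∧ (pvTrace item).any (fun e => PySem.Str.isIn pvStale e) = true) ∨
      (x = "missing_headline_evidence_rule_trace" ∧ (pvTrace item).any (fun e => PySem.Str.startswith e "headline_evidence_rule:") = false) ∨
      (x = "missing_hidden_test_family_rule_trace" ∧ (pvTrace item).any (fun e => PySem.Str.startswith e "hidden_test_family_rule:") = false) := by
  unfold trace_schema_issues
  split_ifs <;>
    simp_all [Bool.not_eq_true, Bool.not_eq_false,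
      -List.any_eq_true, -List.any_eq_false]

theorem pairwise_names :
    (["admissible_output_visible_canary_evidence_count",
      "diagnostic_evidence_count",
      "hidden_test_family_diagnostic_only",
      "missing_headline_evidence_rule_trace",
      "missing_hidden_test_family_rule_trace",
      "stale_direct_canary_rule_trace"] : List String).Pairwise (· < ·) := by
  have h : ∀ s t : String, s < t ↔ s.toList < t.toList := fun s t => String.lt_iff_toList_lt
  simp only [List.pairwise_cons, List.mem_cons, List.not_mem_nil,
    forall_eq_or_imp, h, List.Pairwise.nil, and_true, IsEmpty.forall_iff,
    forall_true_iff]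
  decide

set_option maxHeartbeats 2000000 in
theorem main_eq (records : List (List (String × List String))) (h : ¬ records = []) :
    record_schema_missing_fields_py records = record_schema_missing_fields_py_alt records := by
  unfold record_schema_missing_fields_py record_schema_missing_fields_py_alt
  simp only [h, ite_false]
  set markers : List (String × Bool) :=
      [("admissible_output_visible_canary_evidence_count",
        records.any (fun item => !(PySem.Dict.contains (PySem.Dict.mk item) "admissible_output_visible_canary_evidence_count"))),
       ("diagnostic_evidence_count",
        records.any (fun item => !(PySem.Dict.contains (PySem.Dict.mk item) "diagnostic_evidence_count"))),
       ("hidden_test_family_diagnostic_only",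
        records.any (fun item => !(PySem.Dict.contains (PySem.Dict.mk item) "hidden_test_family_diagnostic_only"))),
       ("missing_headline_evidence_rule_trace",
        (records.map pvTrace).any (fun t => !(t.any (fun e => PySem.Str.startswith e "headline_evidence_rule:")))),
       ("missing_hidden_test_family_rule_trace",
        (records.map pvTrace).any (fun t => !(t.any (fun e => PySem.Str.startswith e "hidden_test_family_rule:")))),
       ("stale_direct_canary_rule_trace",
        (records.map pvTrace).any (fun t => t.any (fun e => PySem.Str.isIn pvStale e)))] with hmarkers
  have hys_sub : ((markers.filter (fun p => p.2)).map (fun p => p.1)).Sublist (markers.map (fun p => p.1)) :=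
    List.Sublist.map _ List.filter_sublist
  have hpw : ((markers.filter (fun p => p.2)).map (fun p => p.1)).Pairwise (· < ·) := by
    refine List.Pairwise.sublist hys_sub ?_
    rw [hmarkers]; exact pairwise_names
  refine PySem.List.sorted_eq_of_perm_of_pairwise_lt _ _ _ ?_ hpw
  refine (List.perm_ext_iff_of_nodup ?_ ?_).mpr ?_
  · exact hpw.imp (fun hlt => ne_of_lt hlt)
  · exact nodup_foldl_step records PySem.Set.empty (by simp [PySem.Set.empty])
  · intro x
    rw [mem_foldl_step]
    simp only [hmarkers, List.mem_map, List.mem_filter, List.mem_cons,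
      PySem.Set.empty, List.not_mem_nil, false_or, mem_trace_issues, pvFields,
      List.any_map, List.any_eq_true, Bool.not_eq_true']
    aesop

-- ===== VERDICT (by name: the statement is the Claim_ definition above) =====
theorem record_schema_missing_fields_py_spec : Claim_equal_record_schema_missing_fields_py := by
  intro records _
  unfold Spec_record_schema_missing_fields_py
  by_cases h : records = []
  · subst h; rfl
  · exact main_eq records h
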